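-- pv_equiv track=rewrite | github.com/AlejandroLuna02/Analizador-L-xico-Sint-ctico-WEB-FLASK- | app.py | parse_codigo
-- ===== SOURCE A (Python) =====
-- def parse_codigo(code):
--     result = []
--     reserved_words = {'int', 'for', 'if', 'else', 'while', 'return', 'system.out.println'}
--     lines = code.split('\n')
--     for line_number, line in enumerate(lines, start=1):
--         index = 0
--         while index < len(line):
--             word_found = False
--             for word in reserved_words:
--                 if line[index:].startswith(word) and (index + len(word) == len(line) or not line[index + len(word)].isalnum()):
--                     result.append((line_number, index, 'Reserved Word', word))
--                     index += len(word)
--                     word_found = True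
--                     break
--             if word_found:
--                 continue
--
--             character = line[index]
--             if character in [';', '{', '}', '(', ')']:
--                 type_char = 'Semicolon' if character == ';' else 'Brace' if character in ['{', '}'] else 'Parenthesis'
--                 result.append((line_number, index, type_char, character))
--                 index += 1
--             elif character.isdigit():
--                 result.append((line_number, index, 'Number', character))
--                 index += 1
--             else:
--                 index += 1
--     return result
-- ===== SOURCE B (Python) =====
-- def parse_codigo(code):
--     reserved = ('int', 'for', 'if', 'else', 'while', 'return', 'system.out.println')
--     punct = {';': 'Semicolon', '{': 'Brace', '}': 'Brace',
--              '(': 'Parenthesis', ')': 'Parenthesis'}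
--
--     def classify(line, i):
--         for w in reserved:
--             j = i + len(w)
--             if line.startswith(w, i) and (j == len(line) or not line[j].isalnum()):
--                 return ('Reserved Word', w)
--         c = line[i]
--         if c in punct:
--             return (punct[c], c)
--         if c.isdigit():
--             return ('Number', c)
--         return None
--
--     return [(n, i) + t
--             for n, line in enumerate(code.split('\n'), 1)
--             for i in range(len(line))
--             for t in [classify(line, i)] if t is not None]
-- ===== Notes on version B (the rewrite author's own statement) =====
-- stated objective: alternative
-- what changed: A's stateful while-loop scanner that slices line[index:] and jumps the index past each matched reserved word is replaced by a stateless per-position classification (a nested comprehension classifying every position independently via startswith(w, i), no slicing, no skipping), correct because no token can start strictly inside a matched reserved word of this word set.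
import Mathlib
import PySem

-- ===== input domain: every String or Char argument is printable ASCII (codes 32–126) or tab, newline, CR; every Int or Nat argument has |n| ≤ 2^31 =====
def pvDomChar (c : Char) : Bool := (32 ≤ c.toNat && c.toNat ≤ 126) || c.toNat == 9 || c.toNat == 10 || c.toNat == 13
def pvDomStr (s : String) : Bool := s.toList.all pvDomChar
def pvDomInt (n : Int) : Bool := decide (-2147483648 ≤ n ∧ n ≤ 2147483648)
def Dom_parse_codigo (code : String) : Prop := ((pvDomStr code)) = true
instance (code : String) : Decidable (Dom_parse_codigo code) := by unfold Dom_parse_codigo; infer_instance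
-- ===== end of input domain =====

-- B replaces A's stateful index-jumping scanner by a stateless per-position classification
-- (each position is classified independently; no consumed-span skipping): alternative decomposition, same cost.

-- ===== PORT A =====
-- A iterates a Python set literal; the iteration order is irrelevant because no reserved word
-- is a prefix of another, so at most one word can match at a given index. We fix source order.
def pvResWords : List (List Char) :=
  ["int".toList, "for".toList, "if".toList, "else".toList, "while".toList,
   "return".toList, "system.out.println".toList]

-- needed by pvScanA's termination proof (matched words are nonempty)
theorem pvResWords_pos : ∀ w ∈ pvResWords, 0 < w.length := by decide

-- line[index:].startswith(word) and (index+len(word)==len(line) or not line[index+len(word)].isalnum())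
-- (the getD default ' ' is only read when the prefix test already failed, so this is exact for
--  Python's short-circuit 'and': when the prefix holds, index+len(word) ≤ len(line) and the
--  equality case is tested first)
def pvResMatch (l : List Char) (i : Nat) (w : List Char) : Bool :=
  w.isPrefixOf (l.drop i) &&
    (i + w.length == l.length || !(PySem.Chars.isalnum (l.getD (i + w.length) ' ')))

-- 'Semicolon' if c == ';' else 'Brace' if c in ['{','}'] else 'Parenthesis'
def pvPunctTypeA (c : Char) : String :=
  if c = ';' then "Semicolon" else if c = '{' ∨ c = '}' then "Brace" else "Parenthesis"

-- the inner 'while index < len(line)' loop of A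
def pvScanA (l : List Char) (ln : Int) (i : Nat) : List (Int × Int × String × String) :=
  if h : i < l.length then
    match hw : pvResWords.find? (fun w => pvResMatch l i w) with
    | some w => (ln, (i : Int), "Reserved Word", String.ofList w) :: pvScanA l ln (i + w.length)
    | none =>
      let c := l[i]
      if c ∈ [';', '{', '}', '(', ')'] then
        (ln, (i : Int), pvPunctTypeA c, String.ofList [c]) :: pvScanA l ln (i + 1)
      else if PySem.Chars.isdigit c then
        (ln, (i : Int), "Number", String.ofList [c]) :: pvScanA l ln (i + 1)
      else pvScanA l ln (i + 1)
  else []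
termination_by l.length - i
decreasing_by
  · have := pvResWords_pos w (List.mem_of_find?_eq_some hw); omega
  · omega
  · omega
  · omega

def parse_codigo (code : String) : List (Int × Int × String × String) :=
  let lines := PySem.Chars.splitOn code.toList ['\n']
  (PySem.List.enumerate lines 1).foldl (fun acc p => acc ++ pvScanA p.2 p.1 0) []

-- ===== PORT B =====
def pvPunctD : PySem.Dict Char String :=
  PySem.Dict.ofList [(';', "Semicolon"), ('{', "Brace"), ('}', "Brace"),
                     ('(', "Parenthesis"), (')', "Parenthesis")]

-- Source B's classify(line, i); i always lies in range(len(line)), so the getD default is never read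
def pvClassify (l : List Char) (i : Nat) : Option (String × String) :=
  match pvResWords.find? (fun w => pvResMatch l i w) with
  | some w => some ("Reserved Word", String.ofList w)
  | none =>
    let c := l.getD i ' '
    match PySem.Dict.get? pvPunctD c with
    | some t => some (t, String.ofList [c])
    | none => if PySem.Chars.isdigit c then some ("Number", String.ofList [c]) else none

def parse_codigo_alt (code : String) : List (Int × Int × String × String) :=
  (PySem.List.enumerate (PySem.Chars.splitOn code.toList ['\n']) 1).flatMap (fun p =>
    (List.range p.2.length).filterMap (fun i =>
      (pvClassify p.2 i).map (fun t => (p.1, (i : Int), t.1, t.2))))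

-- ===== PRECONDITION & SPEC =====
def Spec_parse_codigo (code : String) (out : List (Int × Int × String × String)) : Prop := out = parse_codigo_alt code
instance (code : String) (out : List (Int × Int × String × String)) : Decidable (Spec_parse_codigo code out) := by unfold Spec_parse_codigo; infer_instance

-- ===== CLAIM (what is proved, stated in full; the proofs are below) =====
def Claim_equal_parse_codigo : Prop := ∀ (code : String), Dom_parse_codigo code → Spec_parse_codigo code (parse_codigo code)

-- ===== LEMMAS AND PROOFS =====

def pvTok (l : List Char) (ln : Int) (i : Nat) : Option (Int × Int × String × String) :=
  (pvClassify l i).map (fun t => (ln, (i : Int), t.1, t.2))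

-- characters of reserved words are never punctuation or digits
theorem pvF0 : ∀ w ∈ pvResWords, ∀ m ∈ List.range w.length,
    PySem.Dict.get? pvPunctD (w.getD m ' ') = none ∧ PySem.Chars.isdigit (w.getD m ' ') = false := by
  decide

-- a reserved word embedded strictly inside another is always followed (inside it) by an alnum char
theorem pvF1 : ∀ w ∈ pvResWords, ∀ m ∈ List.range w.length, m ≠ 0 → ∀ v ∈ pvResWords,
    v.isPrefixOf (w.drop m) = true →
    m + v.length < w.length ∧ PySem.Chars.isalnum (w.getD (m + v.length) ' ') = true := by
  decide

-- a reserved word starting with a proper suffix of another has an alnum char where the first one ends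
theorem pvF2 : ∀ w ∈ pvResWords, ∀ m ∈ List.range w.length, m ≠ 0 → ∀ v ∈ pvResWords,
    (w.drop m).isPrefixOf v = true → w.length - m < v.length →
    PySem.Chars.isalnum (v.getD (w.length - m) ' ') = true := by
  decide

theorem pvGetD_shift (l w t : List Char) (i j : Nat) (ht : l.drop i = w ++ t) (hj : j < w.length) (d : Char) :
    l.getD (i + j) d = w.getD j d := by
  rw [List.getD_eq_getElem?_getD, List.getD_eq_getElem?_getD, ← List.getElem?_drop, ht,
      List.getElem?_append_left hj]

-- no token (reserved, punctuation or digit) can start strictly inside a matched reserved word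
theorem pvSkip (l : List Char) (i : Nat) (w : List Char) (hwmem : w ∈ pvResWords)
    (hm : pvResMatch l i w = true) (k : Nat) (h1 : i < k) (h2 : k < i + w.length) :
    pvClassify l k = none := by
  simp only [pvResMatch, Bool.and_eq_true] at hm
  obtain ⟨hpre, hbnd⟩ := hm
  have hpfx : w <+: l.drop i := List.isPrefixOf_iff_prefix.mp hpre
  obtain ⟨t, ht⟩ := hpfx
  have ht : l.drop i = w ++ t := ht.symm
  have hwpos : 0 < w.length := by omega
  have hile : i ≤ l.length := by
    by_contra hgt
    have : l.drop i = [] := List.drop_eq_nil_of_le (by omega)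
    rw [this] at ht; have := congrArg List.length ht; simp at this; omega
  have hlen : l.length = i + w.length + t.length := by
    have := congrArg List.length ht; simp at this; omega
  set m := k - i with hmdef
  have hk : k = i + m := by omega
  have hm1 : 1 ≤ m := by omega
  have hmw : m < w.length := by omega
  have hmr : m ∈ List.range w.length := List.mem_range.mpr hmw
  have hchar : l.getD k ' ' = w.getD m ' ' := by rw [hk]; exact pvGetD_shift l w t i m ht hmw ' '
  have hdropk : l.drop k = w.drop m ++ t := by
    rw [hk, ← List.drop_drop, ht, List.drop_append_of_le_length (by omega)]
  have hfind : pvResWords.find? (fun v => pvResMatch l k v) = none := by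
    rw [List.find?_eq_none]
    intro v hv hmv
    simp only [pvResMatch, Bool.and_eq_true] at hmv
    obtain ⟨hpv, hbv⟩ := hmv
    have hpv' : v <+: l.drop k := List.isPrefixOf_iff_prefix.mp hpv
    have hvlen : v.length ≤ l.length - k := by
      have := hpv'.length_le; simp at this; omega
    by_cases hcase : m + v.length ≤ w.length
    · -- v lies inside w: by pvF1 it is followed, inside w, by an alnum char, killing v's boundary
      have hvin : v <+: w.drop m := by
        rw [List.prefix_iff_eq_take]
        rw [List.prefix_iff_eq_take, hdropk, List.take_append_of_le_length (by simp; omega)] at hpv'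
        exact hpv'
      obtain ⟨hlt, halnum⟩ := pvF1 w hwmem m hmr (by omega) v hv (List.isPrefixOf_iff_prefix.mpr hvin)
      have hbchar : l.getD (k + v.length) ' ' = w.getD (m + v.length) ' ' := by
        have : k + v.length = i + (m + v.length) := by omega
        rw [this]; exact pvGetD_shift l w t i (m + v.length) ht hlt ' '
      simp only [beq_iff_eq, Bool.or_eq_true, Bool.not_eq_true'] at hbv
      rcases hbv with hbv | hbv
      · omega
      · rw [hbchar, halnum] at hbv; exact absurd hbv (by simp)
    · -- v extends beyond w's end: its char there is alnum (pvF2), contradicting w's boundary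
      have hwd : w.drop m <+: v := by
        rcases List.prefix_or_prefix_of_prefix (hdropk ▸ (List.prefix_append (w.drop m) t)) hpv' with h | h
        · exact h
        · have := h.length_le; simp at this; omega
      have hlt : w.length - m < v.length := by omega
      have halnum := pvF2 w hwmem m hmr (by omega) v hv (List.isPrefixOf_iff_prefix.mpr hwd) hlt
      have hiwlt : i + w.length < l.length := by omega
      simp only [beq_iff_eq, Bool.or_eq_true, Bool.not_eq_true'] at hbnd
      have hbchar : l.getD (i + w.length) ' ' = v.getD (w.length - m) ' ' := by
        have he : i + w.length = k + (w.length - m) := by omega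
        obtain ⟨u, hu⟩ := hpv'
        rw [he]; exact pvGetD_shift l v u k (w.length - m) hu.symm hlt ' '
      rcases hbnd with hbnd | hbnd
      · omega
      · rw [hbchar, halnum] at hbnd; exact absurd hbnd (by simp)
  obtain ⟨hdict, hdig⟩ := pvF0 w hwmem m hmr
  simp only [pvClassify, hfind, hchar, hdict, hdig]
  rfl

theorem pvDict_none (c : Char) (h1 : c ≠ ';') (h2 : c ≠ '{') (h3 : c ≠ '}') (h4 : c ≠ '(') (h5 : c ≠ ')') :
    PySem.Dict.get? pvPunctD c = none := by
  have he : pvPunctD = PySem.Dict.mk [(';', "Semicolon"), ('{', "Brace"), ('}', "Brace"),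
                     ('(', "Parenthesis"), (')', "Parenthesis")] := by rfl
  rw [he]
  simp [Ne.symm h1, Ne.symm h2, Ne.symm h3, Ne.symm h4, Ne.symm h5, PySem.Dict.get?]

-- A's inner while-loop produces exactly B's per-position classification of the remaining indices
theorem pvScanA_range (n : Nat) : ∀ (l : List Char) (ln : Int) (i : Nat), l.length - i ≤ n →
    pvScanA l ln i = (List.range' i (l.length - i)).filterMap (pvTok l ln) := by
  induction n with
  | zero =>
    intro l ln i h
    have hge : ¬ i < l.length := by omega
    rw [pvScanA]
    have h0 : l.length - i = 0 := by omega
    simp [hge, h0]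
  | succ n ih =>
    intro l ln i h
    by_cases hlt : i < l.length
    · rw [pvScanA]
      simp only [dif_pos hlt]
      split
      case _ w heq =>
        have hm : pvResMatch l i w = true := List.find?_some heq
        have hwmem : w ∈ pvResWords := List.mem_of_find?_eq_some heq
        have hwpos : 0 < w.length := pvResWords_pos w hwmem
        have hwle : i + w.length ≤ l.length := by
          have hpre : w.isPrefixOf (l.drop i) = true := by
            simp only [pvResMatch, Bool.and_eq_true] at hm; exact hm.1
          have := (List.isPrefixOf_iff_prefix.mp hpre).length_le
          simp at this; omega
        have hsplit : l.length - i = 1 + ((w.length - 1) + (l.length - (i + w.length))) := by omega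
        rw [hsplit, ← List.range'_append_1, ← List.range'_append_1]
        have h1 : i + 1 + (w.length - 1) = i + w.length := by omega
        rw [h1]
        rw [List.filterMap_append, List.filterMap_append]
        have htok : (List.range' i 1).filterMap (pvTok l ln) =
            [(ln, (i : Int), "Reserved Word", String.ofList w)] := by
          simp [List.range'_one, pvTok, pvClassify, heq]
        have hmid : (List.range' (i + 1) (w.length - 1)).filterMap (pvTok l ln) = [] := by
          rw [List.filterMap_eq_nil_iff]
          intro x hx
          have hxr := List.mem_range'_1.mp hx
          have : pvClassify l x = none := pvSkip l i w hwmem hm x (by omega) (by omega)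
          simp [pvTok, this]
        rw [htok, hmid, ih l ln (i + w.length) (by omega)]
        simp
      case _ heq =>
        have hsplit : l.length - i = 1 + (l.length - (i + 1)) := by omega
        rw [hsplit, ← List.range'_append_1, List.filterMap_append]
        have hgd : l[i]?.getD ' ' = l[i] := by
          rw [List.getElem?_eq_getElem hlt]; rfl
        have hih := ih l ln (i + 1) (by omega)
        by_cases hmem : l[i] ∈ [';', '{', '}', '(', ')']
        · simp only [List.mem_cons, List.not_mem_nil, or_false] at hmem
          have htok : pvTok l ln i =
              some (ln, (i : Int), pvPunctTypeA l[i], String.ofList [l[i]]) := by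
            rcases hmem with h | h | h | h | h <;>
              simp only [pvTok, pvClassify, heq, List.getD_eq_getElem?_getD, hgd, h] <;> rfl
          simp only [if_pos (by simp [hmem] : l[i] ∈ [';', '{', '}', '(', ')'])]
          rw [List.range'_one]
          simp only [List.filterMap_cons, htok, List.filterMap_nil]
          rw [hih]
          simp
        · have hdn : PySem.Dict.get? pvPunctD l[i] = none := by
            simp only [List.mem_cons, List.not_mem_nil, or_false,
              not_or] at hmem
            exact pvDict_none l[i] hmem.1 hmem.2.1 hmem.2.2.1 hmem.2.2.2.1 hmem.2.2.2.2
          simp only [if_neg hmem]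
          by_cases hd : PySem.Chars.isdigit l[i] = true
          · have htok : pvTok l ln i = some (ln, (i : Int), "Number", String.ofList [l[i]]) := by
              simp [pvTok, pvClassify, heq, List.getD_eq_getElem?_getD, hgd, hdn, hd]
            simp only [if_pos hd]
            rw [List.range'_one]
            simp only [List.filterMap_cons, htok, List.filterMap_nil]
            rw [hih]
            simp
          · have htok : pvTok l ln i = none := by
              simp [pvTok, pvClassify, heq, List.getD_eq_getElem?_getD, hgd, hdn, hd]
            simp only [if_neg hd]
            rw [List.range'_one]
            simp only [List.filterMap_cons, htok, List.filterMap_nil]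
            rw [hih]
            simp
    · rw [pvScanA]
      have h0 : l.length - i = 0 := by omega
      simp [hlt, h0]

theorem pv_main (code : String) : parse_codigo code = parse_codigo_alt code := by
  unfold parse_codigo parse_codigo_alt
  rw [PySem.List.foldl_append_eq_flatMap]
  simp only [List.nil_append]
  apply List.flatMap_congr
  intro p _
  rw [pvScanA_range p.2.length p.2 p.1 0 (by omega), List.range_eq_range']
  simp [pvTok]


-- ===== VERDICT (by name: the statement is the Claim_ definition above) =====
theorem parse_codigo_spec : Claim_equal_parse_codigo := by
  intro code _
  unfold Spec_parse_codigo
  exact pv_main code
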